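-- pv_equiv track=rewrite | github.com/Cemonix/Crypto-Analysis | src/kasiski.py | find_gcd_and_factors
-- ===== SOURCE A (Python) =====
-- from math import gcd
-- from functools import reduce
-- from typing import Dict, List, Tuple, Set
--
-- def find_gcd_and_factors(distances_by_seq: Dict[str, List[int]]) -> Dict[str, Set[int]]:
--     gcd_and_factors = {}
--     for seq, distances in distances_by_seq.items():
--         if distances:
--             overall_gcd = reduce(gcd, distances)
--             factors = {i for i in range(1, overall_gcd + 1) if overall_gcd % i == 0}
--             gcd_and_factors[seq] = factors
--     return gcd_and_factors
-- ===== SOURCE B (Python) =====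
-- from math import gcd, isqrt
--
--
-- def find_gcd_and_factors(distances_by_seq):
--     gcd_and_factors = {}
--     for seq, distances in distances_by_seq.items():
--         if distances:
--             g = distances[0]
--             for d in distances[1:]:
--                 g = gcd(g, d)
--             small = []
--             large = []
--             if g > 0:
--                 for i in range(1, isqrt(g) + 1):
--                     if g % i == 0:
--                         small.append(i)
--                         c = g // i
--                         if c != i:
--                             large.append(c)
--             gcd_and_factors[seq] = set(small + large[::-1])
--     return gcd_and_factors
-- ===== Notes on version B (the rewrite author's own statement) =====
-- stated objective: alternative
-- what changed: Divisors of each sequence's gcd are found by trial division up to isqrt(gcd), emitting each small divisor together with its cofactor, instead of testing every integer from 1 to gcd.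
import Mathlib
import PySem

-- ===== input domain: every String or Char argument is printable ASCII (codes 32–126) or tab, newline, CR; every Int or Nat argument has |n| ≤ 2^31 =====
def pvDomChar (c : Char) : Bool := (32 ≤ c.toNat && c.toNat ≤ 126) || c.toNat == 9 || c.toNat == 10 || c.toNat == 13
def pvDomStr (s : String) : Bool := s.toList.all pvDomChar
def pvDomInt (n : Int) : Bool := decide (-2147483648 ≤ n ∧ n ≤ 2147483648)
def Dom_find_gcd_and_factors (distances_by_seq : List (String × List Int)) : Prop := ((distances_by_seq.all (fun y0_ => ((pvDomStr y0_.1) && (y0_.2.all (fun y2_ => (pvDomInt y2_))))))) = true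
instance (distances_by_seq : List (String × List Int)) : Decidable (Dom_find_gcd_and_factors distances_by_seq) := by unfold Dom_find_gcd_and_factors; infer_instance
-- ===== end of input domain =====

-- B finds the divisors of each sequence's gcd by trial division up to isqrt(gcd), emitting each small divisor with its cofactor, instead of testing every integer in 1..gcd (alternative algorithm).

-- ===== PORT A =====
def find_gcd_and_factors (distances_by_seq : List (String × List Int)) : List (String × List Int) :=
  (distances_by_seq.foldl (fun acc p =>
      match p.2 with
      | [] => acc
      | d :: rest =>
        -- reduce(gcd, distances): fold math.gcd over the tail starting from the head
        let overall_gcd : Int := rest.foldl (fun a b => (Int.gcd a b : Int)) d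
        -- {i for i in range(1, overall_gcd + 1) if overall_gcd % i == 0}
        let factors : PySem.Set Int :=
          PySem.Set.ofList ((PySem.List.pyRange 1 (overall_gcd + 1) 1).filter
            (fun i => PySem.Int.mod overall_gcd i == 0))
        PySem.Dict.insert acc p.1 factors)
    (PySem.Dict.empty)).items

-- ===== PORT B =====
def find_gcd_and_factors_alt (distances_by_seq : List (String × List Int)) : List (String × List Int) :=
  (distances_by_seq.foldl (fun acc p =>
      match p.2 with
      | [] => acc
      | d0 :: _ =>
        -- g = distances[0]; for d in distances[1:]: g = gcd(g, d)
        let g : Int := (PySem.List.slice p.2 (some 1) none).foldl (fun a b => (Int.gcd a b : Int)) d0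
        -- trial division up to isqrt(g), collecting divisor/cofactor pairs
        let sl : List Int × List Int :=
          if 0 < g then
            (PySem.List.pyRange 1 ((Nat.sqrt g.toNat : Int) + 1) 1).foldl
              (fun sl i =>
                if PySem.Int.mod g i == 0 then
                  (sl.1 ++ [i],
                   if PySem.Int.floordiv g i != i then sl.2 ++ [PySem.Int.floordiv g i] else sl.2)
                else sl)
              ([], [])
          else ([], [])
        -- set(small + large[::-1])
        let factors : PySem.Set Int := PySem.Set.ofList (sl.1 ++ sl.2.reverse)
        PySem.Dict.insert acc p.1 factors)
    (PySem.Dict.empty)).items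

-- ===== PRECONDITION & SPEC =====
def Spec_find_gcd_and_factors (distances_by_seq : List (String × List Int)) (out : List (String × List Int)) : Prop := out = find_gcd_and_factors_alt distances_by_seq
instance (distances_by_seq : List (String × List Int)) (out : List (String × List Int)) : Decidable (Spec_find_gcd_and_factors distances_by_seq out) := by unfold Spec_find_gcd_and_factors; infer_instance

-- ===== CLAIM (what is proved, stated in full; the proofs are below) =====
def Claim_equal_find_gcd_and_factors : Prop := ∀ (distances_by_seq : List (String × List Int)), Dom_find_gcd_and_factors distances_by_seq → Spec_find_gcd_and_factors distances_by_seq (find_gcd_and_factors distances_by_seq)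

-- ===== LEMMAS AND PROOFS =====

-- B's pair-accumulator loop, characterised: small divisors and cofactors as filters/maps of the range
theorem pvPairFold (g : Int) (l : List Int) (a b : List Int) :
    l.foldl (fun sl i =>
        if PySem.Int.mod g i == 0 then
          (sl.1 ++ [i],
           if PySem.Int.floordiv g i != i then sl.2 ++ [PySem.Int.floordiv g i] else sl.2)
        else sl) (a, b)
    = (a ++ l.filter (fun i => PySem.Int.mod g i == 0),
       b ++ (l.filter (fun i => PySem.Int.mod g i == 0 && PySem.Int.floordiv g i != i)).map
              (fun i => PySem.Int.floordiv g i)) := by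
  induction l generalizing a b with
  | nil => simp
  | cons x xs ih =>
    cases h : (PySem.Int.mod g x == 0) <;>
      cases h2 : (PySem.Int.floordiv g x != x) <;>
        simp only [List.foldl_cons, List.filter_cons, h, h2, Bool.false_and, Bool.true_and,
          Bool.false_eq_true, ite_false, ite_true] <;>
        rw [ih] <;> simp

-- membership in A's list: the divisors of g between 1 and g
theorem pvMemA (g x : Int) :
    x ∈ (PySem.List.pyRange 1 (g + 1) 1).filter (fun i => PySem.Int.mod g i == 0)
    ↔ 1 ≤ x ∧ x ≤ g ∧ x ∣ g := by
  simp only [List.mem_filter, PySem.List.mem_pyRange_one]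
  constructor
  · rintro ⟨⟨h1, h2⟩, hm⟩
    refine ⟨h1, by omega, ?_⟩
    rw [beq_iff_eq, PySem.Int.mod_eq_emod_of_pos (by omega)] at hm
    exact Int.dvd_of_emod_eq_zero hm
  · rintro ⟨h1, h2, hd⟩
    refine ⟨⟨h1, by omega⟩, ?_⟩
    rw [beq_iff_eq, PySem.Int.mod_eq_emod_of_pos (by omega)]
    exact Int.emod_eq_zero_of_dvd hd

-- a cofactor g/i of a small divisor i (i ≤ s, g/i ≠ i) lies strictly above s
theorem pvCofactorGt (g s i : Int) (hg : 0 < g) (hss : s * s ≤ g)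
    (hi : 0 < i) (his : i ≤ s) (hd : i ∣ g) (hne : g / i ≠ i) : s < g / i := by
  have hmul : g / i * i = g := Int.ediv_mul_cancel hd
  have hqpos : 0 < g / i := by nlinarith
  by_contra hcon
  push_neg at hcon
  have e1 : g / i * i = s * s := le_antisymm (by nlinarith) (by nlinarith)
  have e2 : s ≤ i := by nlinarith
  have e3 : i = s := le_antisymm his e2
  apply hne
  rw [← e3] at e1
  exact mul_right_cancel₀ (by omega : i ≠ 0) e1

-- the crux: A's full scan of 1..g equals B's sqrt-bounded divisor/cofactor lists
theorem pvFactors_eq (g : Int) :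
    (PySem.List.pyRange 1 (g + 1) 1).filter (fun i => PySem.Int.mod g i == 0)
    = (if 0 < g then
        (PySem.List.pyRange 1 ((Nat.sqrt g.toNat : Int) + 1) 1).foldl
          (fun sl i =>
            if PySem.Int.mod g i == 0 then
              (sl.1 ++ [i],
               if PySem.Int.floordiv g i != i then sl.2 ++ [PySem.Int.floordiv g i] else sl.2)
            else sl)
          (([] : List Int), ([] : List Int))
      else ([], [])).1
      ++ (if 0 < g then
        (PySem.List.pyRange 1 ((Nat.sqrt g.toNat : Int) + 1) 1).foldl
          (fun sl i =>
            if PySem.Int.mod g i == 0 then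
              (sl.1 ++ [i],
               if PySem.Int.floordiv g i != i then sl.2 ++ [PySem.Int.floordiv g i] else sl.2)
            else sl)
          (([] : List Int), ([] : List Int))
      else ([], [])).2.reverse := by
  by_cases hg : 0 < g
  · rw [if_pos hg, pvPairFold]
    simp only [List.nil_append]
    set s : Int := ((Nat.sqrt g.toNat : Nat) : Int) with hs_def
    have hg0 : (0 : Int) ≤ g := le_of_lt hg
    have hss : s * s ≤ g := by
      have h := Nat.sqrt_le' g.toNat
      rw [pow_two] at h
      have h2 : ((Nat.sqrt g.toNat * Nat.sqrt g.toNat : Nat) : Int) ≤ (g.toNat : Int) := by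
        exact_mod_cast h
      rw [Int.toNat_of_nonneg hg0] at h2
      push_cast at h2
      rw [hs_def]
      exact h2
    have hlt : g < (s + 1) * (s + 1) := by
      have h := Nat.lt_succ_sqrt' g.toNat
      rw [pow_two, Nat.succ_eq_add_one] at h
      have h2 : (g.toNat : Int) < (((Nat.sqrt g.toNat + 1) * (Nat.sqrt g.toNat + 1) : Nat) : Int) := by
        exact_mod_cast h
      rw [Int.toNat_of_nonneg hg0] at h2
      push_cast at h2
      rw [hs_def]
      exact h2
    have hs1 : (0 : Int) < s := by
      have : 0 < Nat.sqrt g.toNat := Nat.sqrt_pos.mpr (by omega)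
      rw [hs_def]
      exact_mod_cast this
    have hsg : s ≤ g := by nlinarith
    have hf : ∀ i : Int, 0 < i → PySem.Int.floordiv g i = g / i := fun i hi =>
      PySem.Int.floordiv_eq_ediv_of_pos hi
    have hP : ∀ i : Int, 0 < i → ((PySem.Int.mod g i == 0) = true ↔ i ∣ g) := by
      intro i hi
      rw [beq_iff_eq, PySem.Int.mod_eq_emod_of_pos hi]
      exact ⟨Int.dvd_of_emod_eq_zero, Int.emod_eq_zero_of_dvd⟩
    -- facts about elements of the Q-filtered range
    have hQmem : ∀ i : Int,
        i ∈ (PySem.List.pyRange 1 (s + 1) 1).filter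
              (fun i => PySem.Int.mod g i == 0 && PySem.Int.floordiv g i != i) →
        0 < i ∧ i ≤ s ∧ i ∣ g ∧ g / i ≠ i := by
      intro i hi
      rw [List.mem_filter, PySem.List.mem_pyRange_one] at hi
      obtain ⟨⟨h1, h2⟩, h3⟩ := hi
      rw [Bool.and_eq_true, bne_iff_ne] at h3
      refine ⟨by omega, by omega, (hP i (by omega)).mp h3.1, ?_⟩
      rw [hf i (by omega)] at h3
      exact h3.2
    have hqpos : ∀ i : Int, 0 < i → i ∣ g → 0 < g / i := by
      intro i hi hd
      have hmul : g / i * i = g := Int.ediv_mul_cancel hd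
      nlinarith
    -- the right-hand side is strictly increasing
    have hsmallpw : ((PySem.List.pyRange 1 (s + 1) 1).filter
        (fun i => PySem.Int.mod g i == 0)).Pairwise (· < ·) :=
      (PySem.List.pairwise_lt_pyRange_one _ _).filter _
    have hlargepw : (((PySem.List.pyRange 1 (s + 1) 1).filter
        (fun i => PySem.Int.mod g i == 0 && PySem.Int.floordiv g i != i)).map
          (fun i => PySem.Int.floordiv g i)).Pairwise (fun a b => b < a) := by
      rw [List.pairwise_map]
      have base : ((PySem.List.pyRange 1 (s + 1) 1).filter
          (fun i => PySem.Int.mod g i == 0 && PySem.Int.floordiv g i != i)).Pairwise (· < ·) :=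
        (PySem.List.pairwise_lt_pyRange_one _ _).filter _
      refine List.Pairwise.imp_of_mem ?_ base
      intro i j hi hj hij
      obtain ⟨hi0, his, hid, _⟩ := hQmem i hi
      obtain ⟨hj0, hjs, hjd, _⟩ := hQmem j hj
      rw [hf i hi0, hf j hj0]
      have hmi : g / i * i = g := Int.ediv_mul_cancel hid
      have hmj : g / j * j = g := Int.ediv_mul_cancel hjd
      have hpi : 0 < g / i := hqpos i hi0 hid
      have hpj : 0 < g / j := hqpos j hj0 hjd
      nlinarith
    have hcross : ∀ a ∈ (PySem.List.pyRange 1 (s + 1) 1).filter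
          (fun i => PySem.Int.mod g i == 0),
        ∀ b ∈ (((PySem.List.pyRange 1 (s + 1) 1).filter
          (fun i => PySem.Int.mod g i == 0 && PySem.Int.floordiv g i != i)).map
            (fun i => PySem.Int.floordiv g i)).reverse, a < b := by
      intro a ha b hb
      rw [List.mem_filter, PySem.List.mem_pyRange_one] at ha
      rw [List.mem_reverse, List.mem_map] at hb
      obtain ⟨i, hi, hfi⟩ := hb
      obtain ⟨hi0, his, hid, hine⟩ := hQmem i hi
      have : s < g / i := pvCofactorGt g s i hg hss hi0 his hid hine
      rw [← hfi, hf i hi0]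
      omega
    have hRpw : ((PySem.List.pyRange 1 (s + 1) 1).filter (fun i => PySem.Int.mod g i == 0)
        ++ (((PySem.List.pyRange 1 (s + 1) 1).filter
              (fun i => PySem.Int.mod g i == 0 && PySem.Int.floordiv g i != i)).map
                (fun i => PySem.Int.floordiv g i)).reverse).Pairwise (· < ·) :=
      List.pairwise_append.mpr ⟨hsmallpw, List.pairwise_reverse.mpr hlargepw, hcross⟩
    have hLpw : ((PySem.List.pyRange 1 (g + 1) 1).filter
        (fun i => PySem.Int.mod g i == 0)).Pairwise (· < ·) :=
      (PySem.List.pairwise_lt_pyRange_one _ _).filter _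
    -- same members on both sides
    have hmem : ∀ x : Int,
        x ∈ ((PySem.List.pyRange 1 (s + 1) 1).filter (fun i => PySem.Int.mod g i == 0)
          ++ (((PySem.List.pyRange 1 (s + 1) 1).filter
                (fun i => PySem.Int.mod g i == 0 && PySem.Int.floordiv g i != i)).map
                  (fun i => PySem.Int.floordiv g i)).reverse)
        ↔ x ∈ (PySem.List.pyRange 1 (g + 1) 1).filter (fun i => PySem.Int.mod g i == 0) := by
      intro x
      rw [pvMemA g x, List.mem_append, List.mem_reverse, List.mem_map]
      constructor
      · rintro (hx | ⟨i, hi, hfi⟩)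
        · rw [List.mem_filter, PySem.List.mem_pyRange_one] at hx
          obtain ⟨⟨h1, h2⟩, h3⟩ := hx
          exact ⟨h1, by omega, (hP x (by omega)).mp h3⟩
        · obtain ⟨hi0, his, hid, hine⟩ := hQmem i hi
          have hmul : g / i * i = g := Int.ediv_mul_cancel hid
          have hpi : 0 < g / i := hqpos i hi0 hid
          have hxd : (g / i) ∣ g := ⟨i, hmul.symm⟩
          rw [← hfi, hf i hi0]
          exact ⟨by omega, Int.le_of_dvd hg hxd, hxd⟩
      · rintro ⟨h1, h2, hd⟩
        by_cases hxs : x ≤ s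
        · left
          rw [List.mem_filter, PySem.List.mem_pyRange_one]
          exact ⟨⟨h1, by omega⟩, (hP x (by omega)).mpr hd⟩
        · right
          push_neg at hxs
          have hmul : g / x * x = g := Int.ediv_mul_cancel hd
          have hpx : 0 < g / x := hqpos x (by omega) hd
          have hswap : g = x * (g / x) := by rw [mul_comm]; exact hmul.symm
          have hgx : g / (g / x) = x := Int.ediv_eq_of_eq_mul_left (by omega) hswap
          refine ⟨g / x, ?_, ?_⟩
          · rw [List.mem_filter, PySem.List.mem_pyRange_one]
            have hile : g / x ≤ s := by nlinarith
            refine ⟨⟨by omega, by omega⟩, ?_⟩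
            rw [Bool.and_eq_true, bne_iff_ne]
            refine ⟨(hP _ (by omega)).mpr ⟨x, hmul.symm⟩, ?_⟩
            rw [hf _ (by omega), hgx]
            omega
          · rw [hf _ (by omega)]
            exact hgx
    have hnodL : ((PySem.List.pyRange 1 (g + 1) 1).filter
        (fun i => PySem.Int.mod g i == 0)).Nodup := hLpw.imp (fun h => ne_of_lt h)
    have hnodR := hRpw.imp (fun {a b} (h : a < b) => ne_of_lt h)
    have hperm := (List.perm_ext_iff_of_nodup hnodR hnodL).mpr hmem
    have e1 := PySem.List.sorted_eq_of_perm_of_pairwise_lt _ _ _ (List.Perm.refl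
        ((PySem.List.pyRange 1 (g + 1) 1).filter (fun i => PySem.Int.mod g i == 0))) hLpw
    have e2 := PySem.List.sorted_eq_of_perm_of_pairwise_lt _ _ _ hperm hRpw
    rw [← e1, e2]
  · simp [hg, PySem.List.pyRange_one_eq_nil (by omega : g + 1 ≤ 1)]

-- ===== VERDICT (by name: the statement is the Claim_ definition above) =====
theorem find_gcd_and_factors_spec : Claim_equal_find_gcd_and_factors := by
  intro l _
  unfold Spec_find_gcd_and_factors find_gcd_and_factors find_gcd_and_factors_alt
  congr 1
  apply PySem.List.foldl_congr_mem
  intro acc p _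
  match hp : p.2 with
  | [] => rfl
  | d :: rest =>
    simp only [PySem.List.slice_from_one, List.tail_cons]
    congr 1
    exact congrArg PySem.Set.ofList (pvFactors_eq _)
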